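-- pv_equiv track=rewrite | github.com/M-Hassan-Raza/Pocket-AES-Encryption | main.py | sub_nibbles_func
-- ===== SOURCE A (Python) =====
-- substitution_box = {
--     "0000": "1010",
--     "0001": "0000",
--     "0010": "1001",
--     "0011": "1110",
--     "0100": "0110",
--     "0101": "0011",
--     "0110": "1111",
--     "0111": "0101",
--     "1000": "0001",
--     "1001": "1101",
--     "1010": "1100",
--     "1011": "0111",
--     "1100": "1011",
--     "1101": "0100",
--     "1110": "0010",
--     "1111": "1000",
-- }
--
-- def sub_nibbles_func(binary_value):
--     """This function performs the substitution of nibbles."""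
--     sub_nibbles_data = []
--
--     # Check if the input is 4 bits or 16 bits
--     if len(binary_value) == 4:
--         # Input is already a 4-bit nibble
--         sub_nibbles_data.append(substitution_box[binary_value])
--     elif len(binary_value) == 16:
--         # Input is a 16-bit binary value, split it into 4-bit nibbles
--         for i in range(0, 16, 4):
--             sub_nibbles_data.append(substitution_box[binary_value[i : i + 4]])
--     else:
--         raise ValueError("Input length must be either 4 or 16 bits")
--
--     hexadecimal_values = []
--
--     for binary_value in sub_nibbles_data:
--         # Convert the binary to an integer and then to a hexadecimal nibble
--         hex_value = hex(int(binary_value, 2))[2:]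
--
--         # Append the hexadecimal nibble to the list
--         hexadecimal_values.append(hex_value)
--
--     return hexadecimal_values
-- ===== SOURCE B (Python) =====
-- # Numeric algorithm: parse the whole bit-string into one integer, then peel base-16
-- # digits low-to-high through an integer S-box, building the answer back-to-front.
-- _SBOX = (10, 0, 9, 14, 6, 3, 15, 5, 1, 13, 12, 7, 11, 4, 2, 8)
-- _HEX = ("0", "1", "2", "3", "4", "5", "6", "7", "8", "9", "a", "b", "c", "d", "e", "f")
--
-- def sub_nibbles_func(binary_value):
--     """Substitute nibbles via an integer S-box on the parsed value; return hex digits."""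
--     if len(binary_value) not in (4, 16):
--         raise ValueError("Input length must be either 4 or 16 bits")
--     n = 0
--     for ch in binary_value:
--         n = n * 2 + (ch == "1")
--     out = []
--     for _ in range(len(binary_value) // 4):
--         out.append(_HEX[_SBOX[n % 16]])
--         n //= 16
--     out.reverse()
--     return out
-- ===== Notes on version B (the rewrite author's own statement) =====
-- stated objective: alternative
-- what changed: B abandons the string-chunk/dict approach entirely: it parses the whole bit-string into one integer, then extracts base-16 digits low-to-high with % 16 and //= 16 through an integer S-box tuple, appending hex digits back-to-front and reversing; no slicing and no string-keyed table.
import Mathlib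
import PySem

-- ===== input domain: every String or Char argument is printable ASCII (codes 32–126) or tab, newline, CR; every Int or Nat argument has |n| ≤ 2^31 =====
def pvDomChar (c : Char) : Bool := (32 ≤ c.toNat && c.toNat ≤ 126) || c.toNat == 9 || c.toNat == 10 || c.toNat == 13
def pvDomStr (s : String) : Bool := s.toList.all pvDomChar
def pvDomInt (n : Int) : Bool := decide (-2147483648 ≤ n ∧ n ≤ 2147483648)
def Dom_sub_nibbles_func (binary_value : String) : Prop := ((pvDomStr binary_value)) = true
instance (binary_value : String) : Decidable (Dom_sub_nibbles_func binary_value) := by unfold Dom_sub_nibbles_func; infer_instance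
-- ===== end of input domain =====

-- B replaces A's string-chunk dict lookups and two sequential loops with a numeric
-- algorithm: parse the bit-string into one integer, peel base-16 digits low-to-high
-- through an integer S-box, build the output back-to-front and reverse (objective: alternative).


-- ===== PORT A =====
def substitutionBox : PySem.Dict String String := PySem.Dict.ofList
  [("0000","1010"),("0001","0000"),("0010","1001"),("0011","1110"),
   ("0100","0110"),("0101","0011"),("0110","1111"),("0111","0101"),
   ("1000","0001"),("1001","1101"),("1010","1100"),("1011","0111"),
   ("1100","1011"),("1101","0100"),("1110","0010"),("1111","1000")]

-- hex(n)[2:] — exact for 0 ≤ n < 16, the only values the substitution box's entries produce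
def hexTail (n : Int) : String :=
  if n = 10 then "a" else if n = 11 then "b" else if n = 12 then "c"
  else if n = 13 then "d" else if n = 14 then "e" else if n = 15 then "f"
  else PySem.Int.toStr n

-- a dict lookup that would be a Python KeyError, and an int(_, 2) that would be a ValueError,
-- are represented by defaults "" / 0; Pre_ excludes exactly those inputs (A raises there)
def sub_nibbles_func (binary_value : String) : List String :=
  let sub_nibbles_data : List String :=
    if PySem.Str.len binary_value = 4 then
      [] ++ [substitutionBox.getD binary_value ""]
    else if PySem.Str.len binary_value = 16 then
      (PySem.List.pyRange 0 16 4).foldl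
        (fun acc i => acc ++ [substitutionBox.getD (PySem.Str.slice binary_value (some i) (some (i + 4))) ""]) []
    else []   -- Python: raise ValueError
  sub_nibbles_data.foldl
    (fun acc s => acc ++ [hexTail ((PySem.Int.ofStrBase? s 2).getD 0)]) []

-- ===== PORT B =====
def sboxB : List Int := [10, 0, 9, 14, 6, 3, 15, 5, 1, 13, 12, 7, 11, 4, 2, 8]
def hexB : List String := ["0","1","2","3","4","5","6","7","8","9","a","b","c","d","e","f"]

-- list indexing is pyGetD with defaults 0 / "" — the index n % 16 is always in [0,16), so
-- Python's IndexError is unreachable; the loop's (out, n) pair is the fold state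
def sub_nibbles_func_alt (binary_value : String) : List String :=
  if PySem.Str.len binary_value = 4 ∨ PySem.Str.len binary_value = 16 then
    let n0 : Int := binary_value.toList.foldl
      (fun n ch => n * 2 + (if ch = '1' then 1 else 0)) 0
    let st := (PySem.List.pyRange 0 (PySem.Int.floordiv (PySem.Str.len binary_value) 4) 1).foldl
      (fun (st : List String × Int) _ =>
        (st.1 ++ [PySem.List.pyGetD hexB (PySem.List.pyGetD sboxB (PySem.Int.mod st.2 16) 0) ""],
         PySem.Int.floordiv st.2 16))
      ([], n0)
    st.1.reverse
  else []   -- Python: raise ValueError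

-- ===== PRECONDITION & SPEC =====
-- Pre_ excludes exactly the inputs where A raises: ValueError for length ≠ 4,16, KeyError for a non-binary nibble.
def Pre_sub_nibbles_func (binary_value : String) : Prop :=
  (PySem.Str.len binary_value = 4 ∨ PySem.Str.len binary_value = 16) ∧
  binary_value.toList.all (fun c => c == '0' || c == '1') = true
instance (binary_value : String) : Decidable (Pre_sub_nibbles_func binary_value) := by
  unfold Pre_sub_nibbles_func; infer_instance

def pvWitness_sub_nibbles_func : String := "0110"

def Spec_sub_nibbles_func (binary_value : String) (out : List String) : Prop := out = sub_nibbles_func_alt binary_value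
instance (binary_value : String) (out : List String) : Decidable (Spec_sub_nibbles_func binary_value out) := by unfold Spec_sub_nibbles_func; infer_instance

-- ===== CLAIM (what is proved, stated in full; the proofs are below) =====
def Claim_equal_sub_nibbles_func : Prop := ∀ (binary_value : String), Dom_sub_nibbles_func binary_value → Pre_sub_nibbles_func binary_value → Spec_sub_nibbles_func binary_value (sub_nibbles_func binary_value)

-- ===== LEMMAS AND PROOFS =====

def bitOf (c : Char) : Int := if c = '1' then 1 else 0

def val4 (a b c d : Char) : Int := 8 * bitOf a + 4 * bitOf b + 2 * bitOf c + bitOf d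

def hexOf (v : Int) : String := PySem.List.pyGetD hexB (PySem.List.pyGetD sboxB v 0) ""

def bfold (l : List Char) : Int :=
  l.foldl (fun n ch => n * 2 + (if ch = '1' then 1 else 0)) 0

theorem bitOf_cases {c : Char} (h : c = '0' ∨ c = '1') : bitOf c = 0 ∨ bitOf c = 1 := by
  rcases h with rfl | rfl <;> simp [bitOf]

theorem val4_bounds {a b c d : Char}
    (ha : a = '0' ∨ a = '1') (hb : b = '0' ∨ b = '1')
    (hc : c = '0' ∨ c = '1') (hd : d = '0' ∨ d = '1') :
    0 ≤ val4 a b c d ∧ val4 a b c d < 16 := by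
  rcases bitOf_cases ha with h1 | h1 <;> rcases bitOf_cases hb with h2 | h2 <;>
    rcases bitOf_cases hc with h3 | h3 <;> rcases bitOf_cases hd with h4 | h4 <;>
    rw [val4, h1, h2, h3, h4] <;> norm_num

theorem fold_bits (l : List Char) (a : Int) :
    l.foldl (fun n ch => n * 2 + (if ch = '1' then 1 else 0)) a
      = a * 2 ^ l.length + bfold l := by
  induction l generalizing a with
  | nil => simp [bfold]
  | cons c t ih =>
    have hb : bfold (c :: t) = (0 * 2 + (if c = '1' then 1 else 0)) * 2 ^ t.length + bfold t := by
      rw [bfold, List.foldl_cons, ih]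
    simp only [List.foldl_cons, List.length_cons]
    rw [ih, hb]
    ring

theorem bfold_append (xs ys : List Char) :
    bfold (xs ++ ys) = bfold xs * 2 ^ ys.length + bfold ys := by
  rw [bfold, List.foldl_append, fold_bits]
  rfl

theorem bfold_quad (a b c d : Char) : bfold [a, b, c, d] = val4 a b c d := by
  simp only [bfold, List.foldl_cons, List.foldl_nil, val4, bitOf]
  ring

-- B's combined table agrees with A's substitute-then-hex on every binary nibble
theorem nib_eq (a b c d : Char)
    (ha : a = '0' ∨ a = '1') (hb : b = '0' ∨ b = '1')
    (hc : c = '0' ∨ c = '1') (hd : d = '0' ∨ d = '1') :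
    hexOf (val4 a b c d)
      = hexTail ((PySem.Int.ofStrBase? (substitutionBox.getD (String.ofList [a,b,c,d]) "") 2).getD 0) := by
  rcases ha with rfl | rfl <;> rcases hb with rfl | rfl <;>
    rcases hc with rfl | rfl <;> rcases hd with rfl | rfl <;> decide

-- B's peel-and-reverse loop, run on ((v0*16+v1)*16+v2)*16+v3 with each vj a base-16 digit,
-- yields the digits in order
theorem loopB (v0 v1 v2 v3 : Int)
    (b0 : 0 ≤ v0 ∧ v0 < 16) (b1 : 0 ≤ v1 ∧ v1 < 16)
    (b2 : 0 ≤ v2 ∧ v2 < 16) (b3 : 0 ≤ v3 ∧ v3 < 16) :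
    (((PySem.List.pyRange 0 4 1).foldl
        (fun (st : List String × Int) _ =>
          (st.1 ++ [PySem.List.pyGetD hexB (PySem.List.pyGetD sboxB (PySem.Int.mod st.2 16) 0) ""],
           PySem.Int.floordiv st.2 16))
        ([], ((v0 * 16 + v1) * 16 + v2) * 16 + v3)).1).reverse
      = [hexOf v0, hexOf v1, hexOf v2, hexOf v3] := by
  have hr : PySem.List.pyRange 0 4 1 = [0, 1, 2, 3] := by decide
  have d1 : PySem.Int.floordiv (((v0 * 16 + v1) * 16 + v2) * 16 + v3) 16 = (v0 * 16 + v1) * 16 + v2 := by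
    rw [PySem.Int.floordiv_eq_ediv_of_pos (by norm_num)]; omega
  have d2 : PySem.Int.floordiv ((v0 * 16 + v1) * 16 + v2) 16 = v0 * 16 + v1 := by
    rw [PySem.Int.floordiv_eq_ediv_of_pos (by norm_num)]; omega
  have d3 : PySem.Int.floordiv (v0 * 16 + v1) 16 = v0 := by
    rw [PySem.Int.floordiv_eq_ediv_of_pos (by norm_num)]; omega
  have m0 : PySem.Int.mod (((v0 * 16 + v1) * 16 + v2) * 16 + v3) 16 = v3 := by
    rw [PySem.Int.mod_eq_emod_of_pos (by norm_num)]; omega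
  have m1 : PySem.Int.mod ((v0 * 16 + v1) * 16 + v2) 16 = v2 := by
    rw [PySem.Int.mod_eq_emod_of_pos (by norm_num)]; omega
  have m2 : PySem.Int.mod (v0 * 16 + v1) 16 = v1 := by
    rw [PySem.Int.mod_eq_emod_of_pos (by norm_num)]; omega
  have m3 : PySem.Int.mod v0 16 = v0 := by
    rw [PySem.Int.mod_eq_emod_of_pos (by norm_num)]; omega
  simp only [hr, List.foldl_cons, List.foldl_nil, d1, d2, d3, m0, m1, m2, m3]
  simp [hexOf]

-- ===== VERDICT (by name: the statement is the Claim_ definition above) =====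

theorem sub_nibbles_func_spec : Claim_equal_sub_nibbles_func := by
  intro bv _ hpre
  obtain ⟨hlen, hbin⟩ := hpre
  unfold Spec_sub_nibbles_func
  have hchars : ∀ c ∈ bv.toList, c = '0' ∨ c = '1' := by
    intro c hc
    have := List.all_eq_true.mp hbin c hc
    simpa using this
  have hofl : bv = String.ofList bv.toList := by simp
  rcases hlen with h4 | h16
  · -- length 4: sixteen concrete nibbles, each decided
    have hl : bv.toList.length = 4 := by
      have := PySem.Str.len_eq bv; omega
    obtain ⟨c0, c1, c2, c3, hl4⟩ : ∃ c0 c1 c2 c3, bv.toList = [c0, c1, c2, c3] := by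
      match hx : bv.toList, hl with
      | [c0, c1, c2, c3], _ => exact ⟨c0, c1, c2, c3, rfl⟩
    have h0 := hchars c0 (by rw [hl4]; simp)
    have h1 := hchars c1 (by rw [hl4]; simp)
    have h2 := hchars c2 (by rw [hl4]; simp)
    have h3 := hchars c3 (by rw [hl4]; simp)
    rw [hofl, hl4]
    rcases h0 with rfl | rfl <;> rcases h1 with rfl | rfl <;>
      rcases h2 with rfl | rfl <;> rcases h3 with rfl | rfl <;> decide
  · -- length 16
    have hl : bv.toList.length = 16 := by
      have := PySem.Str.len_eq bv; omega
    obtain ⟨c0,c1,c2,c3,c4,c5,c6,c7,c8,c9,c10,c11,c12,c13,c14,c15,hl16⟩ :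
        ∃ c0 c1 c2 c3 c4 c5 c6 c7 c8 c9 c10 c11 c12 c13 c14 c15,
          bv.toList = [c0,c1,c2,c3,c4,c5,c6,c7,c8,c9,c10,c11,c12,c13,c14,c15] := by
      match hx : bv.toList, hl with
      | [c0,c1,c2,c3,c4,c5,c6,c7,c8,c9,c10,c11,c12,c13,c14,c15], _ =>
        exact ⟨c0,c1,c2,c3,c4,c5,c6,c7,c8,c9,c10,c11,c12,c13,c14,c15, rfl⟩
    have hch : ∀ c ∈ [c0,c1,c2,c3,c4,c5,c6,c7,c8,c9,c10,c11,c12,c13,c14,c15],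
        c = '0' ∨ c = '1' := by rw [← hl16]; exact hchars
    have h0 := hch c0 (by simp); have h1 := hch c1 (by simp)
    have h2 := hch c2 (by simp); have h3 := hch c3 (by simp)
    have h4' := hch c4 (by simp); have h5 := hch c5 (by simp)
    have h6 := hch c6 (by simp); have h7 := hch c7 (by simp)
    have h8 := hch c8 (by simp); have h9 := hch c9 (by simp)
    have h10 := hch c10 (by simp); have h11 := hch c11 (by simp)
    have h12 := hch c12 (by simp); have h13 := hch c13 (by simp)
    have h14 := hch c14 (by simp); have h15 := hch c15 (by simp)
    rw [hofl, hl16]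
    -- the parsed integer is the four nibble values in base 16
    have hsplit : ([c0,c1,c2,c3,c4,c5,c6,c7,c8,c9,c10,c11,c12,c13,c14,c15] : List Char)
        = [c0,c1,c2,c3] ++ ([c4,c5,c6,c7] ++ ([c8,c9,c10,c11] ++ [c12,c13,c14,c15])) := rfl
    have hn : bfold [c0,c1,c2,c3,c4,c5,c6,c7,c8,c9,c10,c11,c12,c13,c14,c15]
        = ((val4 c0 c1 c2 c3 * 16 + val4 c4 c5 c6 c7) * 16 + val4 c8 c9 c10 c11) * 16
            + val4 c12 c13 c14 c15 := by
      rw [hsplit, bfold_append, bfold_append, bfold_append,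
        bfold_quad, bfold_quad, bfold_quad, bfold_quad]
      simp only [List.length_append, List.length_cons, List.length_nil]
      ring
    have hn' : [c0,c1,c2,c3,c4,c5,c6,c7,c8,c9,c10,c11,c12,c13,c14,c15].foldl
        (fun n ch => n * 2 + (if ch = '1' then 1 else 0)) 0
        = ((val4 c0 c1 c2 c3 * 16 + val4 c4 c5 c6 c7) * 16 + val4 c8 c9 c10 c11) * 16
            + val4 c12 c13 c14 c15 := hn
    have hA : PySem.List.pyRange 0 16 4 = [0, 4, 8, 12] := by decide
    have hL : PySem.Str.len (String.ofList [c0,c1,c2,c3,c4,c5,c6,c7,c8,c9,c10,c11,c12,c13,c14,c15]) = 16 := by simp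
    have hBside : sub_nibbles_func_alt (String.ofList [c0,c1,c2,c3,c4,c5,c6,c7,c8,c9,c10,c11,c12,c13,c14,c15])
        = [hexOf (val4 c0 c1 c2 c3), hexOf (val4 c4 c5 c6 c7),
           hexOf (val4 c8 c9 c10 c11), hexOf (val4 c12 c13 c14 c15)] := by
      simp only [sub_nibbles_func_alt, hL, String.toList_ofList]
      rw [if_pos (by norm_num), hn']
      have hq : PySem.Int.floordiv 16 4 = 4 := by decide
      rw [hq]
      exact loopB _ _ _ _ (val4_bounds h0 h1 h2 h3) (val4_bounds h4' h5 h6 h7)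
        (val4_bounds h8 h9 h10 h11) (val4_bounds h12 h13 h14 h15)
    have t0 : List.take (Int.toNat 4) [c0,c1,c2,c3,c4,c5,c6,c7,c8,c9,c10,c11,c12,c13,c14,c15] = [c0,c1,c2,c3] := rfl
    have t1 : List.take (Int.toNat 8 - Int.toNat 4) (List.drop (Int.toNat 4) [c0,c1,c2,c3,c4,c5,c6,c7,c8,c9,c10,c11,c12,c13,c14,c15]) = [c4,c5,c6,c7] := rfl
    have t2 : List.take (Int.toNat 12 - Int.toNat 8) (List.drop (Int.toNat 8) [c0,c1,c2,c3,c4,c5,c6,c7,c8,c9,c10,c11,c12,c13,c14,c15]) = [c8,c9,c10,c11] := rfl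
    have t3 : List.take (Int.toNat 16 - Int.toNat 12) (List.drop (Int.toNat 12) [c0,c1,c2,c3,c4,c5,c6,c7,c8,c9,c10,c11,c12,c13,c14,c15]) = [c12,c13,c14,c15] := rfl
    rw [hBside]
    simp only [sub_nibbles_func, hL]
    rw [if_pos trivial]
    simp only [hA, List.foldl_cons, List.foldl_nil, List.nil_append]
    norm_num [PySem.Str.slice, PySem.List.slice, PySem.List.clampIdx, t0, t1, t2, t3]
    rw [← nib_eq c0 c1 c2 c3 h0 h1 h2 h3, ← nib_eq c4 c5 c6 c7 h4' h5 h6 h7,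
      ← nib_eq c8 c9 c10 c11 h8 h9 h10 h11, ← nib_eq c12 c13 c14 c15 h12 h13 h14 h15]
    exact ⟨rfl, rfl, rfl, rfl⟩
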